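-- pv_equiv track=rewrite | github.com/chaouchsalah/ERP_OCR | postprocessing.py | remove_repetition
-- ===== SOURCE A (Python) =====
-- def remove_repetition(line):
--     new_line = []
--     # Split line into words
--     line = line.split(' ')
--     for word in line:
--         if len(word)>0:
--             i=0
--             # Ignore all characters that aren't numeric
--             while i < len(word) and word[i].isnumeric():
--                 i += 1
--             if i < len(word):
--                 char = word[i]
--                 i += 1
--                 repetition = 1
--                 while i<len(word) and repetition < 3:
--                     if word[i]==char:
--                         repetition += 1
--                     else :
--                         # Ignore all characters that aren't numeric
--                         while i < len(word) and word[i].isnumeric():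
--                             i += 1
--                         if i < len(word):
--                             char = word[i]
--                             repetition = 1
--                     i += 1
--                 # Verify if word has repetitive characters
--                 if repetition != 3:
--                     new_line.append(word)
--                 elif repetition == 3:
--                     # Special case for websites
--                     if 'www.' in word:
--                         new_line.append(word)
--             else :
--                 new_line.append(word)
--         else :
--             new_line.append(word)
--     new_line = ' '.join(new_line)
--     return new_line
-- ===== SOURCE B (Python) =====
-- def remove_repetition(line):
--     def has_triple(word):
--         return any(a == b == c and not a.isnumeric()
--                    for a, b, c in zip(word, word[1:], word[2:]))
--     return ' '.join(w for w in line.split(' ')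
--                     if not has_triple(w) or 'www.' in w)
-- ===== Notes on version B (the rewrite author's own statement) =====
-- stated objective: simpler
-- what changed: A's hand-rolled state machine (index loop with digit-skipping, a tracked char and a repetition counter that resets) is replaced by a per-word comprehension that directly scans for three consecutive identical non-numeric characters via zip(word, word[1:], word[2:]), then a single join over a filter.
import Mathlib
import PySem

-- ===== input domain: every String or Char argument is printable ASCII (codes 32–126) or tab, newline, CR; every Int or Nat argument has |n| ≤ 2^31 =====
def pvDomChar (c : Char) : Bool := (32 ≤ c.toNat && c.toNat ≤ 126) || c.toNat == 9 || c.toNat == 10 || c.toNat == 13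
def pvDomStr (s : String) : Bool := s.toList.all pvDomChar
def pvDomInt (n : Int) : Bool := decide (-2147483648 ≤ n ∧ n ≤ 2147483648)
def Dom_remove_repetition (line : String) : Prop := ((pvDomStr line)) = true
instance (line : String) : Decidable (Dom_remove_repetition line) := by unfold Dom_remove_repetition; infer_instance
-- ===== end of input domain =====

-- B replaces A's hand-rolled skip/reset scanning automaton by a per-word one-pass scan for a
-- tripled consecutive non-numeric character (objective: simpler). On the ASCII domain,
-- str.isnumeric agrees with PySem.Chars.isdigit.

-- ===== PORT A =====
-- the inner "while i < len(word) and word[i].isnumeric(): i += 1" skips leading numeric chars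
-- of the remaining suffix: List.dropWhile on the suffix.
def aLoop (l : List Char) (char : Char) (rep : Nat) : Nat :=
  -- while i < len(word) and repetition < 3:
  if rep < 3 then
    match l with
    | [] => rep
    | c :: rest =>
      if c == char then aLoop rest char (rep + 1)
      else
        match h : (c :: rest).dropWhile PySem.Chars.isdigit with
        | [] => rep                       -- i runs past len(word); loop ends with old repetition
        | c' :: rest' => aLoop rest' c' 1
  else rep
termination_by l.length
decreasing_by
  · simp
  · have := List.length_dropWhile_le PySem.Chars.isdigit (c :: rest)
    rw [h] at this; simp at this ⊢; omega

-- body of "for word in line: …"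
def aStep (acc : List (List Char)) (word : List Char) : List (List Char) :=
  if word.length > 0 then
    match word.dropWhile PySem.Chars.isdigit with   -- skip leading numeric chars
    | [] => acc ++ [word]                           -- i == len(word): the trailing else keeps word
    | c :: rest =>
      let rep := aLoop rest c 1
      if rep ≠ 3 then acc ++ [word]
      else if PySem.Chars.isIn "www.".toList word then acc ++ [word]   -- website special case
      else acc
  else acc ++ [word]

def remove_repetition (line : String) : String :=
  let words := PySem.Chars.splitOn line.toList [' ']
  let new_line := words.foldl aStep []
  String.mk (PySem.Chars.join [' '] new_line)

-- ===== PORT B =====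
-- any(a == b == c and not a.isnumeric() for a, b, c in zip(word, word[1:], word[2:]))
def bHasTriple (word : List Char) : Bool :=
  ((word.zip (word.drop 1)).zip (word.drop 2)).any
    (fun x => x.1.1 == x.1.2 && x.1.2 == x.2 && !PySem.Chars.isdigit x.1.1)

def remove_repetition_alt (line : String) : String :=
  String.mk (PySem.Chars.join [' ']
    ((PySem.Chars.splitOn line.toList [' ']).filter
      (fun w => !bHasTriple w || PySem.Chars.isIn "www.".toList w)))

-- ===== PRECONDITION & SPEC =====
def Spec_remove_repetition (line : String) (out : String) : Prop := out = remove_repetition_alt line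
instance (line : String) (out : String) : Decidable (Spec_remove_repetition line out) := by unfold Spec_remove_repetition; infer_instance

-- ===== CLAIM (what is proved, stated in full; the proofs are below) =====
def Claim_equal_remove_repetition : Prop := ∀ (line : String), Dom_remove_repetition line → Spec_remove_repetition line (remove_repetition line)

-- ===== LEMMAS AND PROOFS =====

-- structural form of bHasTriple
def bT : List Char → Bool
  | a :: b :: c :: rest => (a == b && b == c && !PySem.Chars.isdigit a) || bT (b :: c :: rest)
  | _ => false

theorem bHasTriple_eq_bT : ∀ word : List Char, bHasTriple word = bT word
  | [] => rfl
  | [_] => rfl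
  | [_, _] => rfl
  | a :: b :: c :: rest => by
    have ih := bHasTriple_eq_bT (b :: c :: rest)
    simp only [bHasTriple, bT, List.drop, List.zip, List.zipWith, List.any_cons] at *
    rw [ih]

theorem bT_cons_digit (d : Char) (rest : List Char) (hd : PySem.Chars.isdigit d = true) :
    bT (d :: rest) = bT rest := by
  match rest with
  | [] => rfl
  | [_] => rfl
  | e1 :: e2 :: r => simp [bT, hd]

theorem aLoop_three (l : List Char) (c : Char) : aLoop l c 3 = 3 := by
  rw [aLoop.eq_def]; simp

-- the per-word automaton of A finds repetition == 3 exactly when a consecutive non-digit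
-- triple exists; (a) the running loop with rep chars `char` already matched, (b) the whole word
theorem key : ∀ n, ∀ l : List Char, l.length ≤ n →
    ((∀ c rest, l.dropWhile PySem.Chars.isdigit = c :: rest → (aLoop rest c 1 = 3 ↔ bT l = true))
      ∧ (l.dropWhile PySem.Chars.isdigit = [] → bT l = false))
    ∧ (∀ char rep, PySem.Chars.isdigit char = false → (rep = 1 ∨ rep = 2) →
        (aLoop l char rep = 3 ↔ bT (List.replicate rep char ++ l) = true)) := by
  intro n
  induction n with
  | zero =>
    intro l hl
    have hnil : l = [] := List.eq_nil_of_length_eq_zero (Nat.le_zero.mp hl)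
    subst hnil
    refine ⟨⟨by simp, fun _ => rfl⟩, ?_⟩
    intro char rep _ hrep
    rw [aLoop.eq_def]
    rcases hrep with h | h <;> subst h <;> simp [bT]
  | succ n ih =>
    intro l hl
    match l with
    | [] => exact ih [] (by simp)
    | d :: rest =>
      have hrest : rest.length ≤ n := by simp at hl; omega
      have ihrest := ih rest hrest
      constructor
      · -- part (S): whole-word form
        by_cases hd : PySem.Chars.isdigit d = true
        · -- leading digit is skipped by A and cannot head a triple in B
          constructor
          · intro c r hdrop
            rw [List.dropWhile_cons_of_pos hd] at hdrop
            rw [bT_cons_digit d rest hd]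
            exact ihrest.1.1 c r hdrop
          · intro hdrop
            rw [List.dropWhile_cons_of_pos hd] at hdrop
            rw [bT_cons_digit d rest hd]
            exact ihrest.1.2 hdrop
        · have hd' : PySem.Chars.isdigit d = false := by simpa using hd
          constructor
          · intro c r hdrop
            rw [List.dropWhile_cons_of_neg (by simp [hd'])] at hdrop
            injection hdrop with h1 h2
            subst h1; subst h2
            simpa using ihrest.2 d 1 hd' (Or.inl rfl)
          · intro hdrop
            rw [List.dropWhile_cons_of_neg (by simp [hd'])] at hdrop
            exact absurd hdrop (by simp)
      · -- part (a): the running loop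
        intro char rep hchar hrep
        rw [aLoop.eq_def]
        have hlt : rep < 3 := by omega
        simp only [if_pos hlt]
        by_cases hdc : d = char
        · subst hdc
          rcases hrep with h | h
          · subst h
            rw [show (1 : Nat) + 1 = 2 from rfl]
            have := ihrest.2 d 2 hchar (Or.inr rfl)
            simpa using this
          · subst h
            rw [show (2 : Nat) + 1 = 3 from rfl, aLoop_three]
            simp [bT, hchar]
        · have hne : (d == char) = false := by simp [hdc]
          rw [if_neg (by simp [hdc])]
          -- B's side: the replicate prefix cannot complete a triple since d ≠ char
          have hcd : ¬ char = d := fun h => hdc h.symm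
          have hbt : bT (List.replicate rep char ++ d :: rest) = bT (d :: rest) := by
            rcases hrep with h | h <;> subst h
            · match rest with
              | [] => simp [bT]
              | e :: r => simp [bT, hcd]
            · simp only [List.replicate, List.cons_append, List.nil_append]
              rw [show bT (char :: char :: d :: rest) =
                    ((char == char && char == d && !PySem.Chars.isdigit char) || bT (char :: d :: rest)) from rfl]
              have h2 : bT (char :: d :: rest) = bT (d :: rest) := by
                match rest with
                | [] => simp [bT]
                | e :: r => simp [bT, hcd]
              simp [hcd, h2]
          rw [hbt]
          -- A's side: skip digits from d on, then restart with rep = 1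
          by_cases hd : PySem.Chars.isdigit d = true
          · have hdrop : (d :: rest).dropWhile PySem.Chars.isdigit = rest.dropWhile PySem.Chars.isdigit :=
              List.dropWhile_cons_of_pos hd
            rw [bT_cons_digit d rest hd]
            match hmatch : rest.dropWhile PySem.Chars.isdigit with
            | [] =>
              rw [hdrop, hmatch]
              have : bT rest = false := ihrest.1.2 hmatch
              rw [this]
              rcases hrep with h | h <;> subst h <;> simp
            | c' :: rest' =>
              rw [hdrop, hmatch]
              exact ihrest.1.1 c' rest' hmatch
          · have hd' : PySem.Chars.isdigit d = false := by simpa using hd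
            have hdrop : (d :: rest).dropWhile PySem.Chars.isdigit = d :: rest :=
              List.dropWhile_cons_of_neg (by simp [hd'])
            rw [hdrop]
            simpa using ihrest.2 d 1 hd' (Or.inl rfl)

-- A's per-word keep/drop decision equals B's filter predicate
theorem aStep_eq (acc : List (List Char)) (word : List Char) :
    aStep acc word =
      if (!bHasTriple word || PySem.Chars.isIn "www.".toList word) then acc ++ [word] else acc := by
  rw [aStep, bHasTriple_eq_bT]
  match word with
  | [] => simp [bT]
  | d :: rest =>
    have hk := key (d :: rest).length (d :: rest) le_rfl
    simp only [List.length_cons, gt_iff_lt, Nat.succ_pos, if_pos]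
    match hdrop : (d :: rest).dropWhile PySem.Chars.isdigit with
    | [] =>
      have : bT (d :: rest) = false := hk.1.2 hdrop
      simp [this]
    | c :: r =>
      have hiff := hk.1.1 c r hdrop
      by_cases h3 : aLoop r c 1 = 3
      · have : bT (d :: rest) = true := hiff.mp h3
        simp only [this, Bool.not_true, Bool.false_or, h3, ne_eq, not_true_eq_false, if_false]
      · have : bT (d :: rest) = false := by
          cases hbt : bT (d :: rest)
          · rfl
          · exact absurd (hiff.mpr hbt) h3
        simp [this, h3]

-- ===== VERDICT (by name: the statement is the Claim_ definition above) =====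
theorem remove_repetition_spec : Claim_equal_remove_repetition := by
  intro line _
  unfold Spec_remove_repetition remove_repetition remove_repetition_alt
  have hfold :
      (PySem.Chars.splitOn line.toList [' ']).foldl aStep [] =
        (PySem.Chars.splitOn line.toList [' ']).filter
          (fun w => !bHasTriple w || PySem.Chars.isIn "www.".toList w) := by
    have := PySem.List.foldl_append_if
      (fun w => !bHasTriple w || PySem.Chars.isIn "www.".toList w)
      (id : List Char → List Char) (PySem.Chars.splitOn line.toList [' ']) []
    simp only [List.map_id, id_eq, List.nil_append] at this
    rw [← this]
    have hfun : aStep = fun (acc : List (List Char)) (w : List Char) =>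
        if (!bHasTriple w || PySem.Chars.isIn "www.".toList w) then acc ++ [w] else acc :=
      funext fun acc => funext fun w => aStep_eq acc w
    rw [hfun]
  simp only [hfold]
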